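-- pv_equiv track=rewrite | github.com/samyhaff/python_projects | 3d.py | Face
-- ===== SOURCE A (Python) =====
-- def Face(Espace,Ecran):
--     L=len(Espace[0][0])
--     H=len(Espace[0])
--     P=len(Espace)
--     for Z in range(0,P):
--         for Y in range(0,H):
--             for X in range(0,L):
--                 K=P-Z-1
--                 if Espace[K][Y][X]!=None:
--                     Ecran[Y][X]=Espace[K][Y][X]
--     return Ecran
-- ===== SOURCE B (Python) =====
-- def Face(Espace, Ecran):
--     # Rebuilds each Ecran row from its existing cells (return value equal to A's;
--     # A mutates cells in place, B replaces whole rows -- side effects differ).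
--     L = len(Espace[0][0])
--     H = len(Espace[0])
--     P = len(Espace)
--
--     def pixel(Y, X, old):
--         if Y < H and X < L:
--             for K in range(P):
--                 v = Espace[K][Y][X]
--                 if v != None:
--                     return v
--         return old
--
--     for Y in range(len(Ecran)):
--         row = Ecran[Y]
--         Ecran[Y] = [pixel(Y, X, row[X]) for X in range(len(row))]
--     return Ecran
-- ===== Notes on version B (the rewrite author's own statement) =====
-- stated objective: alternative
-- what changed: A sweeps all P layers back-to-front, destructively overwriting each pixel once per non-None layer; B instead rebuilds each Ecran row functionally, computing every pixel independently as the first non-None value scanning layers front-to-back (early exit) and keeping the old cell otherwise.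
import Mathlib
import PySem

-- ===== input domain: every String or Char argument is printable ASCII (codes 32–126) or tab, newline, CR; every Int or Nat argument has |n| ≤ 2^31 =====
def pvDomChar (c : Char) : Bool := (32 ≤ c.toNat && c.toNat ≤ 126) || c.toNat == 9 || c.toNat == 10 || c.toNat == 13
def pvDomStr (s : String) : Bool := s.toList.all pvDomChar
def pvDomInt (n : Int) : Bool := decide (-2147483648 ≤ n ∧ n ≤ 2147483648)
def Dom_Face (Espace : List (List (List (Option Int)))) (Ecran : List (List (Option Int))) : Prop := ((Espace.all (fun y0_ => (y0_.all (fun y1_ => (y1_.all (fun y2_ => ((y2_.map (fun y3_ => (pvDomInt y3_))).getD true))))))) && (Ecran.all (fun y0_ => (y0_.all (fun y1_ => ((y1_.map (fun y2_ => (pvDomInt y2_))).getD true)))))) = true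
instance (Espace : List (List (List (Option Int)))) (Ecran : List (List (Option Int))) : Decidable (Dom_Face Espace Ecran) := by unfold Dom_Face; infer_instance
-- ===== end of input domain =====

-- B rebuilds each Ecran row functionally (one independent per-pixel front-to-back search with
-- early exit) instead of A's destructive back-to-front overwrite of every non-None layer.
-- Both Pythons mutate Ecran (A writes cells, B replaces rows); equivalence is about the return value.

-- ===== PORT A =====
-- Espace[K][Y][X] for Nat indices; exact when in range (Pre_ puts every read in range)
def cellE (Espace : List (List (List (Option Int)))) (K Y X : Nat) : Option Int :=
  ((Espace.getD K []).getD Y []).getD X none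

-- Ecran[Y][X] = v; exact when Y, X are in range (guaranteed by Pre_)
def writeCell (Y X : Nat) (v : Option Int) (e : List (List (Option Int))) : List (List (Option Int)) :=
  e.set Y ((e.getD Y []).set X v)

def Face (Espace : List (List (List (Option Int)))) (Ecran : List (List (Option Int))) : List (List (Option Int)) :=
  let L := ((Espace.getD 0 []).getD 0 []).length
  let H := (Espace.getD 0 []).length
  let P := Espace.length
  (List.range P).foldl (fun ecr Z =>
    (List.range H).foldl (fun ecr Y =>
      (List.range L).foldl (fun ecr X =>
        let K := P - Z - 1
        match cellE Espace K Y X with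
        | none => ecr
        | some v => writeCell Y X (some v) ecr) ecr) ecr) Ecran

-- ===== PORT B =====
-- Source B's inner `for K in range(P): … return v` loop inside pixel(): scan the given layer
-- indices, return the first non-None cell, fall through to `old` when none hits
def pixLoop (Espace : List (List (List (Option Int)))) (Y X : Nat) (old : Option Int) : List Nat → Option Int
  | [] => old
  | K :: ks =>
    match ((Espace.getD K []).getD Y []).getD X none with
    | some v => some v
    | none => pixLoop Espace Y X old ks

-- Source B's pixel(Y, X, old)
def pix (Espace : List (List (List (Option Int)))) (H L P Y X : Nat) (old : Option Int) : Option Int :=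
  if Y < H ∧ X < L then pixLoop Espace Y X old (List.range P) else old

def Face_alt (Espace : List (List (List (Option Int)))) (Ecran : List (List (Option Int))) : List (List (Option Int)) :=
  let L := ((Espace.getD 0 []).getD 0 []).length
  let H := (Espace.getD 0 []).length
  let P := Espace.length
  Ecran.mapIdx (fun Y row => row.mapIdx (fun X old => pix Espace H L P Y X old))

-- ===== PRECONDITION & SPEC =====
-- Pre_ excludes exactly the inputs on which A raises IndexError: empty Espace or Espace[0],
-- a layer lacking the H×L shape of layer 0, or a pixel (y,x) that some layer makes non-None
-- (so A writes it) lying outside Ecran.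
def Pre_Face (Espace : List (List (List (Option Int)))) (Ecran : List (List (Option Int))) : Prop :=
  Espace ≠ [] ∧ Espace.getD 0 [] ≠ [] ∧
  (0 < ((Espace.getD 0 []).getD 0 []).length →
   ∀ layer ∈ Espace, (Espace.getD 0 []).length ≤ layer.length ∧
     ∀ y ∈ List.range (Espace.getD 0 []).length,
       ((Espace.getD 0 []).getD 0 []).length ≤ (layer.getD y []).length) ∧
  (∀ y ∈ List.range (Espace.getD 0 []).length,
     ∀ x ∈ List.range ((Espace.getD 0 []).getD 0 []).length,
       (∃ K ∈ List.range Espace.length, cellE Espace K y x ≠ none) →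
         y < Ecran.length ∧ x < (Ecran.getD y []).length)
instance (Espace : List (List (List (Option Int)))) (Ecran : List (List (Option Int))) : Decidable (Pre_Face Espace Ecran) := by unfold Pre_Face; infer_instance

def pvWitness_Face : List (List (List (Option Int))) × List (List (Option Int)) :=
  ([[[some 1, none], [none, some 2]], [[none, some 3], [some 4, none]]],
   [[none, none], [some 9, none]])

def Spec_Face (Espace : List (List (List (Option Int)))) (Ecran : List (List (Option Int))) (out : List (List (Option Int))) : Prop := out = Face_alt Espace Ecran
instance (Espace : List (List (List (Option Int)))) (Ecran : List (List (Option Int))) (out : List (List (Option Int))) : Decidable (Spec_Face Espace Ecran out) := by unfold Spec_Face; infer_instance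

-- ===== CLAIM (what is proved, stated in full; the proofs are below) =====
def Claim_equal_Face : Prop := ∀ (Espace : List (List (List (Option Int)))) (Ecran : List (List (Option Int))), Dom_Face Espace Ecran → Pre_Face Espace Ecran → Spec_Face Espace Ecran (Face Espace Ecran)

-- ===== LEMMAS AND PROOFS =====

-- reading a cell, total form used throughout the proofs
def cellOf (e : List (List (Option Int))) (y x : Nat) : Option Int :=
  (e.getD y []).getD x none

-- the conditional write A performs
def upd (Y X : Nat) (v : Option Int) (e : List (List (Option Int))) : List (List (Option Int)) :=
  match v with
  | none => e
  | some a => writeCell Y X (some a) e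

-- one full Y,X sweep writing f Y X wherever it is non-none
def sweep (H L : Nat) (f : Nat → Nat → Option Int) (e : List (List (Option Int))) : List (List (Option Int)) :=
  (List.range H).foldl (fun e Y => (List.range L).foldl (fun e X => upd Y X (f Y X) e) e) e

-- A as a fold of back-to-front sweeps
def aFold (H L P : Nat) (c : Nat → Nat → Nat → Option Int) (e : List (List (Option Int))) : List (List (Option Int)) :=
  (List.range P).foldl (fun e Z => sweep H L (fun Y X => c (P - Z - 1) Y X) e) e

-- proof-side: first non-None layer value at (Y,X), front to back
def firstLayer (Espace : List (List (List (Option Int)))) (Y X : Nat) : List Nat → Option Int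
  | [] => none
  | K :: ks =>
    match cellE Espace K Y X with
    | some v => some v
    | none => firstLayer Espace Y X ks

theorem pixLoop_eq_firstLayer (Espace : List (List (List (Option Int)))) (Y X : Nat)
    (old : Option Int) (l : List Nat) :
    pixLoop Espace Y X old l =
      match firstLayer Espace Y X l with
      | some v => some v
      | none => old := by
  induction l with
  | nil => simp [pixLoop, firstLayer]
  | cons k ks ih =>
    simp only [pixLoop, firstLayer, cellE]
    cases ((Espace.getD k []).getD Y []).getD X none <;> simp [ih]

theorem getD_set_self {α : Type} (l : List α) (i : Nat) (a d : α) (h : i < l.length) :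
    (l.set i a).getD i d = a := by
  simp [List.getD_eq_getElem?_getD, List.getElem?_set_self h]

theorem getD_set_ne {α : Type} (l : List α) (i j : Nat) (a d : α) (h : i ≠ j) :
    (l.set i a).getD j d = l.getD j d := by
  simp [List.getD_eq_getElem?_getD, List.getElem?_set_ne h]

theorem length_upd (Y X : Nat) (v : Option Int) (e : List (List (Option Int))) :
    (upd Y X v e).length = e.length := by
  cases v <;> simp [upd, writeCell]

theorem rowlen_upd (Y X : Nat) (v : Option Int) (e : List (List (Option Int))) (y : Nat) :
    ((upd Y X v e).getD y []).length = (e.getD y []).length := by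
  cases v with
  | none => rfl
  | some a =>
    simp only [upd, writeCell]
    by_cases hY : Y < e.length
    · by_cases hy : y = Y
      · subst hy; rw [getD_set_self _ _ _ _ hY]; simp
      · rw [getD_set_ne _ _ _ _ _ (Ne.symm hy)]
    · rw [List.set_eq_of_length_le (by omega)]

theorem cellOf_upd (Y X : Nat) (v : Option Int) (e : List (List (Option Int)))
    (hb : v.isSome = true → Y < e.length ∧ X < (e.getD Y []).length) (y x : Nat) :
    cellOf (upd Y X v e) y x =
      if y = Y ∧ x = X ∧ v.isSome then v else cellOf e y x := by
  cases v with
  | none => simp [upd, cellOf]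
  | some a =>
    obtain ⟨hY, hX⟩ := hb rfl
    simp only [upd, writeCell, cellOf, Option.isSome_some, and_true]
    by_cases hy : y = Y
    · subst hy
      rw [getD_set_self _ _ _ _ hY]
      by_cases hx : x = X
      · subst hx; rw [getD_set_self _ _ _ _ hX]; simp
      · rw [getD_set_ne _ _ _ _ _ (Ne.symm hx)]; simp [hx]
    · rw [getD_set_ne _ _ _ _ _ (Ne.symm hy)]; simp [hy]

-- row sweep over an arbitrary X-list
theorem row_foldl_props (Y : Nat) (f : Nat → Nat → Option Int) (l : List Nat)
    (e : List (List (Option Int)))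
    (hl : ∀ X ∈ l, (f Y X).isSome = true → Y < e.length ∧ X < (e.getD Y []).length) :
    (l.foldl (fun e X => upd Y X (f Y X) e) e).length = e.length ∧
    (∀ y, ((l.foldl (fun e X => upd Y X (f Y X) e) e).getD y []).length = (e.getD y []).length) ∧
    (∀ y x, cellOf (l.foldl (fun e X => upd Y X (f Y X) e) e) y x =
      if y = Y ∧ x ∈ l ∧ (f Y x).isSome then f Y x else cellOf e y x) := by
  induction l generalizing e with
  | nil => simp
  | cons X ls ih =>
    simp only [List.foldl_cons]
    have h1 := length_upd Y X (f Y X) e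
    have h2 := rowlen_upd Y X (f Y X) e
    obtain ⟨ihl, ihr, ihc⟩ := ih (upd Y X (f Y X) e)
      (fun x hx hs => by rw [h2, h1]; exact hl x (by simp [hx]) hs)
    refine ⟨by rw [ihl, h1], fun y => by rw [ihr y, h2], fun y x => ?_⟩
    rw [ihc y x, cellOf_upd Y X (f Y X) e (hl X (by simp)) y x]
    by_cases hy : y = Y
    · subst hy
      by_cases hmem : x ∈ ls <;> by_cases hxX : x = X <;>
        subst_eqs <;> simp_all
    · simp [hy]

-- full sweep characterization
theorem sweep_props (H L : Nat) (f : Nat → Nat → Option Int) (e : List (List (Option Int)))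
    (hw : ∀ y ∈ List.range H, ∀ x ∈ List.range L,
      (f y x).isSome = true → y < e.length ∧ x < (e.getD y []).length) :
    (sweep H L f e).length = e.length ∧
    (∀ y, ((sweep H L f e).getD y []).length = (e.getD y []).length) ∧
    (∀ y x, cellOf (sweep H L f e) y x =
      if y < H ∧ x < L ∧ (f y x).isSome then f y x else cellOf e y x) := by
  unfold sweep
  have main : ∀ (m : List Nat) (e : List (List (Option Int))),
      (∀ y ∈ m, ∀ x ∈ List.range L, (f y x).isSome = true → y < e.length ∧ x < (e.getD y []).length) →
      (m.foldl (fun e Y => (List.range L).foldl (fun e X => upd Y X (f Y X) e) e) e).length = e.length ∧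
      (∀ y, ((m.foldl (fun e Y => (List.range L).foldl (fun e X => upd Y X (f Y X) e) e) e).getD y []).length = (e.getD y []).length) ∧
      (∀ y x, cellOf (m.foldl (fun e Y => (List.range L).foldl (fun e X => upd Y X (f Y X) e) e) e) y x =
        if y ∈ m ∧ x < L ∧ (f y x).isSome then f y x else cellOf e y x) := by
    intro m
    induction m with
    | nil => simp
    | cons Y ms ih =>
      intro e hm
      simp only [List.foldl_cons]
      obtain ⟨r1, r2, r3⟩ := row_foldl_props Y f (List.range L) e
        (fun X hX hs => hm Y (by simp) X hX hs)
      obtain ⟨i1, i2, i3⟩ := ih ((List.range L).foldl (fun e X => upd Y X (f Y X) e) e)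
        (fun y hy x hx hs => by rw [r1, r2 y]; exact hm y (by simp [hy]) x hx hs)
      refine ⟨by rw [i1, r1], fun y => by rw [i2 y, r2 y], fun y x => ?_⟩
      rw [i3 y x]
      by_cases hyms : y ∈ ms
      · simp only [hyms, List.mem_cons, or_true, true_and]
        rw [r3 y x]
        by_cases hc : x < L ∧ (f y x).isSome = true
        · simp [hc]
        · simp only [if_neg hc]
          by_cases hyY : y = Y
          · subst hyY
            rw [if_neg (by simp only [List.mem_range]; tauto)]
          · rw [if_neg (by tauto)]
      · simp only [hyms, false_and, if_false]
        rw [r3 y x]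
        by_cases hyY : y = Y
        · subst hyY; simp [List.mem_range, hyms]
        · simp [hyY, hyms]
  obtain ⟨a, b, c⟩ := main (List.range H) e hw
  exact ⟨a, b, fun y x => by rw [c y x]; simp [List.mem_range]⟩

theorem firstLayer_append (Espace : List (List (List (Option Int)))) (Y X : Nat) (l1 l2 : List Nat) :
    firstLayer Espace Y X (l1 ++ l2) =
      match firstLayer Espace Y X l1 with
      | some v => some v
      | none => firstLayer Espace Y X l2 := by
  induction l1 with
  | nil => simp [firstLayer]
  | cons k ks ih =>
    simp only [List.cons_append, firstLayer]
    cases cellE Espace k Y X <;> simp [ih]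

theorem aFold_succ (H L P : Nat) (c : Nat → Nat → Nat → Option Int) (e : List (List (Option Int))) :
    aFold H L (P + 1) c e = aFold H L P c (sweep H L (fun Y X => c P Y X) e) := by
  unfold aFold
  rw [List.range_succ_eq_map]
  simp only [List.foldl_cons, List.foldl_map]
  have hz : ∀ (z : Nat), P + 1 - (z + 1) - 1 = P - z - 1 := by omega
  simp

-- cell characterization of A's fold of sweeps
theorem aFold_props (Espace : List (List (List (Option Int)))) (H L P : Nat)
    (e : List (List (Option Int)))
    (hw : ∀ y ∈ List.range H, ∀ x ∈ List.range L,
      (∃ K ∈ List.range P, cellE Espace K y x ≠ none) → y < e.length ∧ x < (e.getD y []).length) :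
    (aFold H L P (cellE Espace) e).length = e.length ∧
    (∀ y, ((aFold H L P (cellE Espace) e).getD y []).length = (e.getD y []).length) ∧
    (∀ y x, cellOf (aFold H L P (cellE Espace) e) y x =
      if y < H ∧ x < L then
        match firstLayer Espace y x (List.range P) with
        | some v => some v
        | none => cellOf e y x
      else cellOf e y x) := by
  induction P generalizing e with
  | zero =>
    refine ⟨rfl, fun y => rfl, fun y x => ?_⟩
    simp [aFold, firstLayer]
  | succ P ih =>
    rw [aFold_succ]
    obtain ⟨s1, s2, s3⟩ := sweep_props H L (fun Y X => cellE Espace P Y X) e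
      (fun y hy x hx hs => hw y hy x hx
        ⟨P, List.mem_range.mpr (Nat.lt_succ_self P), by simpa [Option.isSome_iff_ne_none] using hs⟩)
    obtain ⟨i1, i2, i3⟩ := ih (sweep H L (fun Y X => cellE Espace P Y X) e)
      (fun y hy x hx ⟨K, hK, hs⟩ => by
        rw [s1, s2 y]
        exact hw y hy x hx ⟨K, List.mem_range.mpr (Nat.lt_succ_of_lt (List.mem_range.mp hK)), hs⟩)
    refine ⟨by rw [i1, s1], fun y => by rw [i2 y, s2 y], fun y x => ?_⟩
    rw [i3 y x, List.range_succ, firstLayer_append]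
    by_cases hin : y < H ∧ x < L
    · simp only [hin, and_true, if_true]
      rw [s3 y x]
      cases hf : firstLayer Espace y x (List.range P) with
      | some v => simp
      | none =>
        simp only
        have : firstLayer Espace y x [P] =
            match cellE Espace P y x with | some v => some v | none => none := by
          simp [firstLayer]
        rw [this]
        cases hc : cellE Espace P y x <;> simp [hin]
    · simp only [hin, if_false]
      rw [s3 y x]
      rw [if_neg (by tauto)]

theorem firstLayer_isSome_iff (Espace : List (List (List (Option Int)))) (Y X : Nat) (l : List Nat) :
    (firstLayer Espace Y X l).isSome = true ↔ ∃ K ∈ l, cellE Espace K Y X ≠ none := by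
  induction l with
  | nil => simp [firstLayer]
  | cons k ks ih =>
    simp only [firstLayer, List.mem_cons]
    cases hk : cellE Espace k Y X <;> simp [hk, ih]

theorem Face_eq_aFold (Espace : List (List (List (Option Int)))) (Ecran : List (List (Option Int))) :
    Face Espace Ecran =
      aFold ((Espace.getD 0 []).length) (((Espace.getD 0 []).getD 0 []).length)
        Espace.length (cellE Espace) Ecran := rfl

-- B-side characterization -------------------------------------------------

theorem getD_mapIdx_nested {α : Type} (g : Nat → Nat → α → α) (e : List (List α)) (y : Nat) :
    (e.mapIdx (fun Y row => row.mapIdx (fun X old => g Y X old))).getD y [] =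
      (e.getD y []).mapIdx (fun X old => g y X old) := by
  by_cases h : y < e.length
  · rw [List.getD_eq_getElem _ _ (by simpa using h), List.getD_eq_getElem _ _ h]
    simp
  · rw [List.getD_eq_default _ _ (by simpa using Nat.le_of_not_lt h),
        List.getD_eq_default _ _ (Nat.le_of_not_lt h)]
    simp

theorem getD_mapIdx_cell {α : Type} (g : Nat → α → α) (row : List α) (x : Nat) (d : α) :
    (row.mapIdx g).getD x d = if x < row.length then g x (row.getD x d) else d := by
  by_cases h : x < row.length
  · rw [List.getD_eq_getElem _ _ (by simpa using h), List.getD_eq_getElem _ _ h]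
    simp [h]
  · rw [List.getD_eq_default _ _ (by simpa using Nat.le_of_not_lt h),
        List.getD_eq_default _ _ (Nat.le_of_not_lt h)]
    simp [h]

theorem Face_alt_props (Espace : List (List (List (Option Int)))) (e : List (List (Option Int))) :
    (Face_alt Espace e).length = e.length ∧
    (∀ y, ((Face_alt Espace e).getD y []).length = (e.getD y []).length) ∧
    (∀ y x, cellOf (Face_alt Espace e) y x =
      if x < (e.getD y []).length then
        pix Espace ((Espace.getD 0 []).length) (((Espace.getD 0 []).getD 0 []).length)
          Espace.length y x (cellOf e y x)
      else none) := by
  refine ⟨by simp [Face_alt], fun y => ?_, fun y x => ?_⟩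
  · rw [show Face_alt Espace e = e.mapIdx (fun Y row => row.mapIdx (fun X old =>
        pix Espace ((Espace.getD 0 []).length) (((Espace.getD 0 []).getD 0 []).length)
          Espace.length Y X old)) from rfl,
      getD_mapIdx_nested]
    simp
  · rw [show Face_alt Espace e = e.mapIdx (fun Y row => row.mapIdx (fun X old =>
        pix Espace ((Espace.getD 0 []).length) (((Espace.getD 0 []).getD 0 []).length)
          Espace.length Y X old)) from rfl]
    unfold cellOf
    rw [getD_mapIdx_nested, getD_mapIdx_cell]

-- a cell read outside Ecran's bounds is none
theorem cellOf_out (e : List (List (Option Int))) (y x : Nat)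
    (h : ¬ x < (e.getD y []).length) : cellOf e y x = none :=
  List.getD_eq_default _ _ (Nat.le_of_not_lt h)

-- extensionality through lengths, row lengths and cells
theorem ext_cells (a b : List (List (Option Int))) (hlen : a.length = b.length)
    (hrow : ∀ y, (a.getD y []).length = (b.getD y []).length)
    (hcell : ∀ y x, cellOf a y x = cellOf b y x) : a = b := by
  apply List.ext_getElem hlen
  intro y h1 h2
  have hra : a.getD y [] = a[y] := List.getD_eq_getElem a [] h1
  have hrb : b.getD y [] = b[y] := List.getD_eq_getElem b [] h2
  apply List.ext_getElem
  · have := hrow y; rwa [hra, hrb] at this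
  · intro x hx1 hx2
    have := hcell y x
    simp only [cellOf, hra, hrb] at this
    rwa [List.getD_eq_getElem _ _ hx1, List.getD_eq_getElem _ _ hx2] at this

-- ===== VERDICT (by name: the statement is the Claim_ definition above) =====
theorem Face_spec : Claim_equal_Face := by
  intro Espace Ecran _ hPre
  obtain ⟨hE, hE0, _, hwrite⟩ := hPre
  unfold Spec_Face
  rw [Face_eq_aFold]
  obtain ⟨a1, a2, a3⟩ := aFold_props Espace _ _ Espace.length Ecran hwrite
  obtain ⟨b1, b2, b3⟩ := Face_alt_props Espace Ecran
  apply ext_cells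
  · rw [a1, b1]
  · intro y; rw [a2 y, b2 y]
  · intro y x
    rw [a3 y x, b3 y x]
    set H := (Espace.getD 0 []).length
    set L := ((Espace.getD 0 []).getD 0 []).length
    by_cases hx : x < (Ecran.getD y []).length
    · simp only [hx, if_true]
      unfold pix
      by_cases hin : y < H ∧ x < L
      · rw [if_pos hin, pixLoop_eq_firstLayer]
        cases firstLayer Espace y x (List.range Espace.length) <;> simp [hin]
      · simp [hin]
    · simp only [hx, if_false]
      have hout := cellOf_out Ecran y x hx
      by_cases hin : y < H ∧ x < L
      · rw [if_pos hin]
        cases hf : firstLayer Espace y x (List.range Espace.length) with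
        | none => exact hout
        | some v =>
          exfalso
          have hs : (firstLayer Espace y x (List.range Espace.length)).isSome = true := by
            rw [hf]; rfl
          obtain ⟨K, hK, hne⟩ := (firstLayer_isSome_iff Espace y x _).mp hs
          have := hwrite y (List.mem_range.mpr hin.1) x (List.mem_range.mpr hin.2) ⟨K, hK, hne⟩
          exact hx this.2
      · simp only [hin, if_false]; exact hout
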